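-- pv_equiv track=rewrite | github.com/byee4/researcher-ai | researcher_ai/parsers/methods_parser.py | _normalize_assay_name
-- ===== SOURCE A (Python) =====
-- from typing import Any, Optional
--
-- def _normalize_assay_name(
--     name: str, canonical_names: list[str]
-- ) -> Optional[str]:
--     """Match an LLM-returned assay name to the canonical list.
--
--     Returns the canonical name on match, or ``None`` if no match is found.
--     Match strategy (in order):
--     1. Exact match.
--     2. Case-insensitive match.
--     3. Case-insensitive substring containment (canonical in name, or name in canonical).
--     """
--     # 1. Exact
--     if name in canonical_names:
--         return name
--     # 2. Case-insensitive exact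
--     name_lower = name.lower()
--     for cn in canonical_names:
--         if cn.lower() == name_lower:
--             return cn
--     # 3. Substring containment (prefer shortest canonical that contains the name)
--     candidates: list[str] = []
--     for cn in canonical_names:
--         cn_lower = cn.lower()
--         if name_lower in cn_lower or cn_lower in name_lower:
--             candidates.append(cn)
--     if len(candidates) == 1:
--         return candidates[0]
--     # Ambiguous or no match
--     return None
-- ===== SOURCE B (Python) =====
-- def _normalize_assay_name(name, canonical_names):
--     """Single pass over canonical_names collecting all three match kinds at once,
--     then applying the priority: exact > first case-insensitive > unique substring."""
--     name_lower = name.lower()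
--     exact = False
--     ci = None
--     candidates = []
--     for cn in canonical_names:
--         if cn == name:
--             exact = True
--         cn_lower = cn.lower()
--         if ci is None and cn_lower == name_lower:
--             ci = cn
--         if name_lower in cn_lower or cn_lower in name_lower:
--             candidates.append(cn)
--     if exact:
--         return name
--     if ci is not None:
--         return ci
--     if len(candidates) == 1:
--         return candidates[0]
--     return None
-- ===== Notes on version B (the rewrite author's own statement) =====
-- stated objective: alternative
-- what changed: Replaces A's three separate scans (membership test, case-insensitive loop, candidate-collecting loop) with a single fold over canonical_names that maintains an exact-match flag, the first case-insensitive match, and the substring-candidate list simultaneously, applying the priority once after the loop.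
import Mathlib
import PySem

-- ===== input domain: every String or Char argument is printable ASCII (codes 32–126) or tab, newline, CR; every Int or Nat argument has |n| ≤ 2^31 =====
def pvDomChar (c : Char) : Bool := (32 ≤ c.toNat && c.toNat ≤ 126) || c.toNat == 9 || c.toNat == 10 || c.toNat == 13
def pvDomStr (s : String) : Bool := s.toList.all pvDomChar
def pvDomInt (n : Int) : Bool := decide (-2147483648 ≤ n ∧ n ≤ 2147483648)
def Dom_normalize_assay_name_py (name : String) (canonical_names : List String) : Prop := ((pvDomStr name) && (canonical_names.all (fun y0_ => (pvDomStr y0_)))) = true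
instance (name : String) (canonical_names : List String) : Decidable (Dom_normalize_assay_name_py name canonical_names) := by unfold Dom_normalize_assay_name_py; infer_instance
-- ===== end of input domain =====

-- B does one fused pass instead of A's three scans; same cost, alternative decomposition.

-- ===== PORT A =====
-- step 2: first cn whose lowercase equals name_lower (early return)
def pvA_ci (nl : String) : List String → Option String
  | [] => none
  | cn :: rest => if PySem.Str.lower cn == nl then some cn else pvA_ci nl rest

-- step 3: collect candidates with substring containment either way
def pvA_cands (nl : String) : List String → List String
  | [] => []
  | cn :: rest =>
    let cnl := PySem.Str.lower cn
    if PySem.Str.isIn nl cnl || PySem.Str.isIn cnl nl then cn :: pvA_cands nl rest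
    else pvA_cands nl rest

def normalize_assay_name_py (name : String) (canonical_names : List String) : Option String :=
  if canonical_names.contains name then some name
  else
    let name_lower := PySem.Str.lower name
    match pvA_ci name_lower canonical_names with
    | some cn => some cn
    | none =>
      let candidates := pvA_cands name_lower canonical_names
      if candidates.length == 1 then candidates.head? else none

-- ===== PORT B =====
-- one fold maintaining (exact flag, first case-insensitive match, candidate list)
def pvB_step (name nl : String) (st : Bool × Option String × List String) (cn : String) :
    Bool × Option String × List String :=
  let e := if cn == name then true else st.1
  let cnl := PySem.Str.lower cn
  let ci := if st.2.1.isNone && cnl == nl then some cn else st.2.1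
  let cs := if PySem.Str.isIn nl cnl || PySem.Str.isIn cnl nl then st.2.2 ++ [cn] else st.2.2
  (e, ci, cs)

def normalize_assay_name_py_alt (name : String) (canonical_names : List String) : Option String :=
  let nl := PySem.Str.lower name
  let st := canonical_names.foldl (pvB_step name nl) (false, none, [])
  if st.1 then some name
  else
    match st.2.1 with
    | some cn => some cn
    | none => if st.2.2.length == 1 then st.2.2.head? else none

-- ===== PRECONDITION & SPEC =====
def Spec_normalize_assay_name_py (name : String) (canonical_names : List String) (out : Option String) : Prop := out = normalize_assay_name_py_alt name canonical_names
instance (name : String) (canonical_names : List String) (out : Option String) : Decidable (Spec_normalize_assay_name_py name canonical_names out) := by unfold Spec_normalize_assay_name_py; infer_instance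

-- ===== CLAIM (what is proved, stated in full; the proofs are below) =====
def Claim_equal_normalize_assay_name_py : Prop := ∀ (name : String) (canonical_names : List String), Dom_normalize_assay_name_py name canonical_names → Spec_normalize_assay_name_py name canonical_names (normalize_assay_name_py name canonical_names)

-- ===== LEMMAS AND PROOFS =====

-- B's fold computes (membership ∨ flag, flag <|> A's CI scan, prefix ++ A's candidate list).
theorem pvB_foldl_eq (name nl : String) (l : List String) (e : Bool) (ci : Option String)
    (cs : List String) :
    l.foldl (pvB_step name nl) (e, ci, cs) =
      (e || l.contains name, ci.orElse (fun _ => pvA_ci nl l), cs ++ pvA_cands nl l) := by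
  induction l generalizing e ci cs with
  | nil => simp [pvA_ci, pvA_cands]
  | cons cn rest ih =>
    rw [List.foldl_cons, ih]
    have hsym : (name == cn) = (cn == name) := by
      by_cases h : name = cn
      · simp [h]
      · simp [h, Ne.symm h]
    refine Prod.ext ?_ (Prod.ext ?_ ?_)
    · simp only [pvB_step, List.contains_cons, hsym]
      by_cases h1 : cn == name <;> simp [h1]
    · cases ci <;> simp only [pvB_step, pvA_ci, Option.isNone, Option.orElse] <;>
        split_ifs <;> simp_all
    · simp only [pvB_step, pvA_cands]
      split_ifs <;> simp

-- ===== VERDICT (by name: the statement is the Claim_ definition above) =====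
theorem normalize_assay_name_py_spec : Claim_equal_normalize_assay_name_py := by
  intro name cns _
  show normalize_assay_name_py name cns = normalize_assay_name_py_alt name cns
  unfold normalize_assay_name_py normalize_assay_name_py_alt
  simp only [pvB_foldl_eq]
  by_cases h : name ∈ cns
  · simp [h]
  · simp only [List.contains_eq_mem, h, decide_false, Bool.false_or, Option.orElse,
      Bool.false_eq_true, if_false, List.nil_append]
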